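-- pv_equiv track=rewrite | github.com/Orajt93/rep | Zad2.py | funkcja1
-- ===== SOURCE A (Python) =====
-- def funkcja1(a_list, b_list):
--     zad1return=[]
--     if(len(a_list)>len(b_list)):
--         liczbaIteracji=len(a_list)
--     else:
--         liczbaIteracji=len(b_list)
--     for i in range(0,liczbaIteracji):
--         if(i<len(a_list) and i%2==0):
--             zad1return.append(i)
--         if(i<len(b_list) and i%2==1):
--             zad1return.append(i)
--     return zad1return
-- ===== SOURCE B (Python) =====
-- def funkcja1(a_list, b_list):
--     evens = list(range(0, len(a_list), 2))
--     odds = list(range(1, len(b_list), 2))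
--     return sorted(evens + odds)
-- ===== Notes on version B (the rewrite author's own statement) =====
-- stated objective: simpler
-- what changed: Replaces the single index loop with per-parity membership tests by two arithmetic range generators (even indices bounded by len(a_list), odd indices bounded by len(b_list)) concatenated and sorted back into ascending order.
import Mathlib
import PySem

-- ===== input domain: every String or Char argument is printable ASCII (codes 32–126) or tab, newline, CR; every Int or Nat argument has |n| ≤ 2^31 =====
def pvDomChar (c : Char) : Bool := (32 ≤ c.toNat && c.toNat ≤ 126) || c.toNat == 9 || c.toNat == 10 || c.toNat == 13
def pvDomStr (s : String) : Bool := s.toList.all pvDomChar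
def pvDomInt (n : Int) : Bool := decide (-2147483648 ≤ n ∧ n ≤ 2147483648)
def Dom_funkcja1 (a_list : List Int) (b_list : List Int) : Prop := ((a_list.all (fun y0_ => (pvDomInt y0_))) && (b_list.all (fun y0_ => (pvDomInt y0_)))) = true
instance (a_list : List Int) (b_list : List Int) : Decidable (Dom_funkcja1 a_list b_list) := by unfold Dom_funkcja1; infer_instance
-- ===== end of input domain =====

-- B replaces A's single parity-testing index loop by two arithmetic range generators
-- (even indices bounded by a_list, odd indices bounded by b_list) concatenated and sorted: simpler decomposition.


-- ===== PORT A =====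
def funkcja1 (a_list : List Int) (b_list : List Int) : List Int :=
  let liczbaIteracji : Int :=
    if (a_list.length : Int) > (b_list.length : Int) then (a_list.length : Int) else (b_list.length : Int)
  (PySem.List.pyRange 0 liczbaIteracji 1).foldl
    (fun zad1return i =>
      let zad1return :=
        if i < (a_list.length : Int) ∧ PySem.Int.mod i 2 = 0 then zad1return ++ [i] else zad1return
      if i < (b_list.length : Int) ∧ PySem.Int.mod i 2 = 1 then zad1return ++ [i] else zad1return)
    []

-- ===== PORT B =====
def funkcja1_alt (a_list : List Int) (b_list : List Int) : List Int :=
  let evens := PySem.List.pyRange 0 (a_list.length : Int) 2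
  let odds := PySem.List.pyRange 1 (b_list.length : Int) 2
  PySem.List.sorted (evens ++ odds) (fun x => x)

-- ===== PRECONDITION & SPEC =====
def Spec_funkcja1 (a_list : List Int) (b_list : List Int) (out : List Int) : Prop := out = funkcja1_alt a_list b_list
instance (a_list : List Int) (b_list : List Int) (out : List Int) : Decidable (Spec_funkcja1 a_list b_list out) := by unfold Spec_funkcja1; infer_instance

-- ===== CLAIM (what is proved, stated in full; the proofs are below) =====
def Claim_equal_funkcja1 : Prop := ∀ (a_list : List Int) (b_list : List Int), Dom_funkcja1 a_list b_list → Spec_funkcja1 a_list b_list (funkcja1 a_list b_list)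

-- ===== LEMMAS AND PROOFS =====

-- the common value of both programs: indices below max, even ones bounded by la, odd ones by lb
def pvTarg (la lb : Nat) : List Int :=
  ((List.range (max la lb)).filter
      (fun k => (decide (k < la) && decide (k % 2 = 0)) || (decide (k < lb) && decide (k % 2 = 1)))).map
    (fun (k : Nat) => (k : Int))

theorem pv_filter_or_perm {α : Type} (p q : α → Bool) (hdis : ∀ x, ¬(p x = true ∧ q x = true)) :
    ∀ l : List α, (l.filter (fun x => p x || q x)).Perm (l.filter p ++ l.filter q) := by
  intro l
  induction l with
  | nil => simp
  | cons x l ih =>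
    by_cases hp : p x = true
    · have hq : q x = false := by
        cases hq : q x
        · rfl
        · exact absurd ⟨hp, hq⟩ (hdis x)
      simpa [List.filter_cons, hp, hq] using ih.cons x
    · have hp' : p x = false := by simpa using hp
      cases hq : q x with
      | false => simpa [List.filter_cons, hp', hq] using ih
      | true =>
        simp only [List.filter_cons, hp', hq, Bool.false_or]
        exact (ih.cons x).trans (List.Perm.symm (List.perm_middle))

theorem pv_filter_bounded (P : Nat → Bool) (m n : Nat) (h : m ≤ n) :
    (List.range n).filter (fun k => decide (k < m) && P k) = (List.range m).filter P := by
  obtain ⟨d, rfl⟩ := Nat.exists_eq_add_of_le h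
  rw [List.range_add, List.filter_append]
  have h1 : (List.range m).filter (fun k => decide (k < m) && P k) = (List.range m).filter P := by
    apply List.filter_congr
    intro k hk
    simp [List.mem_range.mp hk]
  have h2 : (((List.range d).map (fun x => m + x)).filter (fun k => decide (k < m) && P k)) = [] := by
    apply List.filter_eq_nil_iff.mpr
    intro a ha
    obtain ⟨x, _, rfl⟩ := List.mem_map.mp ha
    simp [Nat.not_lt.mpr (Nat.le_add_right m x)]
  rw [h1, h2, List.append_nil]

theorem pv_filter_even (m : Nat) :
    (List.range m).filter (fun k => decide (k % 2 = 0)) = (List.range ((m + 1) / 2)).map (fun k => 2 * k) := by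
  induction m with
  | zero => simp
  | succ m ih =>
    rw [List.range_succ, List.filter_append]
    by_cases he : m % 2 = 0
    · have h2 : (m + 1 + 1) / 2 = (m + 1) / 2 + 1 := by omega
      have h3 : 2 * ((m + 1) / 2) = m := by omega
      rw [h2, List.range_succ, List.map_append, ih]
      simp [he, h3]
    · have h2 : (m + 1 + 1) / 2 = (m + 1) / 2 := by omega
      rw [h2, ih]
      simp [he]

theorem pv_filter_odd (m : Nat) :
    (List.range m).filter (fun k => decide (k % 2 = 1)) = (List.range (m / 2)).map (fun k => 2 * k + 1) := by
  induction m with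
  | zero => simp
  | succ m ih =>
    rw [List.range_succ, List.filter_append]
    by_cases he : m % 2 = 1
    · have h2 : (m + 1) / 2 = m / 2 + 1 := by omega
      have h3 : 2 * (m / 2) + 1 = m := by omega
      rw [h2, List.range_succ, List.map_append, ih]
      simp [he, h3]
    · have h2 : (m + 1) / 2 = m / 2 := by omega
      rw [h2, ih]
      simp [he]

theorem pv_pyRange_even (la : Nat) :
    PySem.List.pyRange 0 (la : Int) 2 = ((List.range la).filter (fun k => decide (k % 2 = 0))).map (fun (k : Nat) => (k : Int)) := by
  rw [PySem.List.pyRange_of_pos 0 (la : Int) (by norm_num), pv_filter_even, List.map_map]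
  have hn : (if (0 : Int) < (la : Int) then (((la : Int) - 0 + 2 - 1) / 2).toNat else 0) = (la + 1) / 2 := by
    split_ifs with h <;> omega
  rw [hn]
  apply List.map_congr_left
  intro k _
  simp

theorem pv_pyRange_odd (lb : Nat) :
    PySem.List.pyRange 1 (lb : Int) 2 = ((List.range lb).filter (fun k => decide (k % 2 = 1))).map (fun (k : Nat) => (k : Int)) := by
  rw [PySem.List.pyRange_of_pos 1 (lb : Int) (by norm_num), pv_filter_odd, List.map_map]
  have hn : (if (1 : Int) < (lb : Int) then (((lb : Int) - 1 + 2 - 1) / 2).toNat else 0) = lb / 2 := by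
    split_ifs with h <;> omega
  rw [hn]
  apply List.map_congr_left
  intro k _
  simp
  ring

theorem pvTarg_pairwise (la lb : Nat) : (pvTarg la lb).Pairwise (fun a b => a < b) := by
  unfold pvTarg
  rw [List.pairwise_map]
  have h := List.Pairwise.sublist
      (List.filter_sublist (l := List.range (max la lb))
        (p := fun k => (decide (k < la) && decide (k % 2 = 0)) || (decide (k < lb) && decide (k % 2 = 1))))
      List.pairwise_lt_range
  exact h.imp (by intro a b hab; exact_mod_cast hab)

theorem pvTarg_perm (la lb : Nat) :
    (pvTarg la lb).Perm (PySem.List.pyRange 0 (la : Int) 2 ++ PySem.List.pyRange 1 (lb : Int) 2) := by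
  unfold pvTarg
  rw [pv_pyRange_even, pv_pyRange_odd, ← List.map_append]
  apply List.Perm.map
  have hd : ∀ k : Nat, ¬((decide (k < la) && decide (k % 2 = 0)) = true ∧ (decide (k < lb) && decide (k % 2 = 1)) = true) := by
    intro k hk
    simp at hk
    omega
  have := pv_filter_or_perm _ _ hd (List.range (max la lb))
  rw [pv_filter_bounded _ la _ (Nat.le_max_left la lb), pv_filter_bounded _ lb _ (Nat.le_max_right la lb)] at this
  exact this

theorem funkcja1_alt_eq (a_list b_list : List Int) :
    funkcja1_alt a_list b_list = pvTarg a_list.length b_list.length := by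
  unfold funkcja1_alt
  exact PySem.List.sorted_eq_of_perm_of_pairwise_lt _ _ _
    (pvTarg_perm a_list.length b_list.length) (pvTarg_pairwise a_list.length b_list.length)

theorem funkcja1_eq (a_list b_list : List Int) :
    funkcja1 a_list b_list = pvTarg a_list.length b_list.length := by
  simp only [funkcja1]
  have hiter : (if (a_list.length : Int) > (b_list.length : Int) then (a_list.length : Int) else (b_list.length : Int))
      = ((max a_list.length b_list.length : Nat) : Int) := by
    split_ifs with h <;> push_cast <;> omega
  rw [hiter, PySem.List.pyRange_zero_natCast, List.foldl_map]
  have hstep : (fun (zad1return : List Int) (k : Nat) =>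
      let zad1return := if (k : Int) < (a_list.length : Int) ∧ PySem.Int.mod (k : Int) 2 = 0 then zad1return ++ [(k : Int)] else zad1return
      if (k : Int) < (b_list.length : Int) ∧ PySem.Int.mod (k : Int) 2 = 1 then zad1return ++ [(k : Int)] else zad1return)
      = (fun (acc : List Int) (k : Nat) =>
          if ((decide (k < a_list.length) && decide (k % 2 = 0)) || (decide (k < b_list.length) && decide (k % 2 = 1))) = true
          then acc ++ [(k : Int)] else acc) := by
    funext acc k
    have hmod : PySem.Int.mod (k : Int) 2 = ((k % 2 : Nat) : Int) := by
      simp [PySem.Int.mod, Int.fmod_eq_emod]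
    simp only [hmod]
    split_ifs with h1 h2 h2 <;> simp_all <;> omega
  rw [hstep, PySem.List.foldl_append_if]
  unfold pvTarg
  simp

-- ===== VERDICT (by name: the statement is the Claim_ definition above) =====
theorem funkcja1_spec : Claim_equal_funkcja1 := by
  intro a_list b_list _
  unfold Spec_funkcja1
  rw [funkcja1_eq, funkcja1_alt_eq]
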